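-- pv_equiv track=rewrite | github.com/PratyushKumarSingh0/Black-strom- | Black Strom/phishing_simulator.py | check_password_complexity
-- ===== SOURCE A (Python) =====
-- def check_password_complexity(password):
--     """Check password against complexity rules"""
--     feedback = []
--
--     if len(password) < 8:
--         feedback.append("- At least 8 characters")
--     if not any(c.isupper() for c in password):
--         feedback.append("- At least one uppercase letter")
--     if not any(c.islower() for c in password):
--         feedback.append("- At least one lowercase letter")
--     if not any(c.isdigit() for c in password):
--         feedback.append("- At least one number")
--     if not any(c in '!@#$%^&*()' for c in password):
--         feedback.append("- At least one special character")
--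
--     return '\n'.join(feedback) if feedback else ''
-- ===== SOURCE B (Python) =====
-- def check_password_complexity(password):
--     """Check password against complexity rules"""
--     has_upper = has_lower = has_digit = has_special = False
--     for c in password:
--         if c.isupper():
--             has_upper = True
--         if c.islower():
--             has_lower = True
--         if c.isdigit():
--             has_digit = True
--         if c in '!@#$%^&*()':
--             has_special = True
--     feedback = []
--     if len(password) < 8:
--         feedback.append("- At least 8 characters")
--     if not has_upper:
--         feedback.append("- At least one uppercase letter")
--     if not has_lower:
--         feedback.append("- At least one lowercase letter")
--     if not has_digit:
--         feedback.append("- At least one number")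
--     if not has_special:
--         feedback.append("- At least one special character")
--     return '\n'.join(feedback)
-- ===== Notes on version B (the rewrite author's own statement) =====
-- stated objective: simpler
-- what changed: Replaces the four separate any()-scans of the password (one per character class) with a single pass that maintains four boolean flags, then appends the same feedback lines in the same order; the final newline-join needs no emptiness guard since joining an empty list already yields an empty string.
import Mathlib
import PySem

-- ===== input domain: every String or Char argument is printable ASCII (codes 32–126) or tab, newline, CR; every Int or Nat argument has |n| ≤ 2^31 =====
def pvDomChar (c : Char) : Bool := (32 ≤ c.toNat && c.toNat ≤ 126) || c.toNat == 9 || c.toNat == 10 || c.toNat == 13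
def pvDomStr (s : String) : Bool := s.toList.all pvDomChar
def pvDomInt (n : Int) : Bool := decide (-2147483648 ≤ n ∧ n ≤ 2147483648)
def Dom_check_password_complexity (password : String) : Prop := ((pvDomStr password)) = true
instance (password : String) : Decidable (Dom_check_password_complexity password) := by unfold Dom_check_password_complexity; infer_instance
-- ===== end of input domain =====

-- ===== PORT A =====
-- B merges A's four separate any()-scans into one flag-setting pass; objective: simpler.
def pvSpecialChars : List Char := "!@#$%^&*()".toList

def check_password_complexity (password : String) : String :=
  let cs := password.toList
  let feedback : List String := []
  let feedback := if PySem.Str.len password < 8 then feedback ++ ["- At least 8 characters"] else feedback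
  let feedback := if ¬ (cs.any PySem.Chars.isupper) then feedback ++ ["- At least one uppercase letter"] else feedback
  let feedback := if ¬ (cs.any PySem.Chars.islower) then feedback ++ ["- At least one lowercase letter"] else feedback
  let feedback := if ¬ (cs.any PySem.Chars.isdigit) then feedback ++ ["- At least one number"] else feedback
  let feedback := if ¬ (cs.any (fun c => pvSpecialChars.contains c)) then feedback ++ ["- At least one special character"] else feedback
  if feedback ≠ [] then PySem.Str.join "\n" feedback else ""

-- ===== PORT B =====
-- single pass over the characters, maintaining the four flags (Source B's for-loop)
def pvScan : List Char → Bool → Bool → Bool → Bool → Bool × Bool × Bool × Bool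
  | [], u, l, d, s => (u, l, d, s)
  | c :: cs, u, l, d, s =>
      pvScan cs (if PySem.Chars.isupper c then true else u)
                (if PySem.Chars.islower c then true else l)
                (if PySem.Chars.isdigit c then true else d)
                (if pvSpecialChars.contains c then true else s)

def check_password_complexity_alt (password : String) : String :=
  let (hasUpper, hasLower, hasDigit, hasSpecial) := pvScan password.toList false false false false
  let feedback : List String := []
  let feedback := if PySem.Str.len password < 8 then feedback ++ ["- At least 8 characters"] else feedback
  let feedback := if ¬ hasUpper then feedback ++ ["- At least one uppercase letter"] else feedback
  let feedback := if ¬ hasLower then feedback ++ ["- At least one lowercase letter"] else feedback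
  let feedback := if ¬ hasDigit then feedback ++ ["- At least one number"] else feedback
  let feedback := if ¬ hasSpecial then feedback ++ ["- At least one special character"] else feedback
  PySem.Str.join "\n" feedback

-- ===== PRECONDITION & SPEC =====
def Spec_check_password_complexity (password : String) (out : String) : Prop := out = check_password_complexity_alt password
instance (password : String) (out : String) : Decidable (Spec_check_password_complexity password out) := by unfold Spec_check_password_complexity; infer_instance

-- ===== CLAIM (what is proved, stated in full; the proofs are below) =====
def Claim_equal_check_password_complexity : Prop := ∀ (password : String), Dom_check_password_complexity password → Spec_check_password_complexity password (check_password_complexity password)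

-- ===== LEMMAS AND PROOFS =====
theorem pvScan_spec (cs : List Char) (u l d s : Bool) :
    pvScan cs u l d s =
      (u || cs.any PySem.Chars.isupper, l || cs.any PySem.Chars.islower,
       d || cs.any PySem.Chars.isdigit, s || cs.any (fun c => pvSpecialChars.contains c)) := by
  induction cs generalizing u l d s with
  | nil => simp [pvScan]
  | cons c cs ih =>
    simp only [pvScan, ih, List.any_cons]
    cases hu : PySem.Chars.isupper c <;> cases hl : PySem.Chars.islower c <;>
      cases hd : PySem.Chars.isdigit c <;> cases hs : pvSpecialChars.contains c <;> simp

theorem pv_join_nil_empty : PySem.Str.join "\n" ([] : List String) = "" := by decide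

-- ===== VERDICT (by name: the statement is the Claim_ definition above) =====
theorem check_password_complexity_spec : Claim_equal_check_password_complexity := by
  intro password _
  unfold Spec_check_password_complexity check_password_complexity check_password_complexity_alt
  rw [pvScan_spec]
  simp only [Bool.false_or]
  split_ifs <;> simp_all [pv_join_nil_empty]
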